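-- pv_equiv track=rewrite | github.com/julianaconsolati/bingo | src/bingo.py | fila_mayor_abajo
-- ===== SOURCE A (Python) =====
-- def fila_mayor_abajo(mi_carton):
--     for columna in range(9):
--         if mi_carton[0][columna] != 0:
--             if mi_carton[1][columna] != 0:
--                 if mi_carton[0][columna] > mi_carton[1][columna]:
--                     return False
--             if mi_carton[2][columna] != 0:
--                 if mi_carton[0][columna] > mi_carton[2][columna]:
--                     return False
--
--         if mi_carton[1][columna] != 0:
--             if mi_carton[2][columna] != 0:
--                 if mi_carton[1][columna] > mi_carton[2][columna]:
--                     return False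
--     return True
-- ===== SOURCE B (Python) =====
-- def fila_mayor_abajo(mi_carton):
--     for columna in range(9):
--         vals = [fila[columna] for fila in mi_carton[:3] if fila[columna] != 0]
--         if any(a > b for a, b in zip(vals, vals[1:])):
--             return False
--     return True
-- ===== Notes on version B (the rewrite author's own statement) =====
-- stated objective: simpler
-- what changed: Replaces the three hand-written nested pairwise conditionals with, per column, building the compacted list of nonzero cells of the first three rows and scanning it once for a descending adjacent pair (consecutive order implies all-pairs order for integers).
-- outside the precondition, e.g. on fila_mayor_abajo([[9, 5], [1, 5], []]): A returns False, B raises IndexError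
import Mathlib
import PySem

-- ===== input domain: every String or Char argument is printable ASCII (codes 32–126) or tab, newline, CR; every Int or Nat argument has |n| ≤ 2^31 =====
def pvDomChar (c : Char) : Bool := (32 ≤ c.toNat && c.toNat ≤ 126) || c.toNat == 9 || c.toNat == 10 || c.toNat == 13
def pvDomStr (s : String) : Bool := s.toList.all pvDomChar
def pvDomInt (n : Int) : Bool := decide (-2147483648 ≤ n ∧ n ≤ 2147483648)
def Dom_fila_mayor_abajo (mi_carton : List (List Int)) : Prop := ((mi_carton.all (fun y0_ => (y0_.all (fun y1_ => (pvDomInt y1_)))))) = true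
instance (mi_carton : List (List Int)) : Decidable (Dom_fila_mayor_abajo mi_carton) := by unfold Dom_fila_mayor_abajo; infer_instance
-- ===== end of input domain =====

-- B replaces A's three nested pairwise conditionals by, per column, compacting the nonzero
-- cells of the first three rows into a list and scanning it once for a descending adjacent
-- pair; Pre_ (stated below) excludes the inputs on which A raises and the corner inputs on
-- which only B's compaction hits a too-short row.


-- ===== PORT A =====
-- mi_carton[r][c] fetched through pyGetD (the default 0 is only ever reached outside Pre_)
def pvCellA (carton : List (List Int)) (r c : Int) : Int :=
  PySem.List.pyGetD (PySem.List.pyGetD carton r ([] : List Int)) c 0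

def pvLoopA (carton : List (List Int)) : List Int → Bool
  | [] => true
  | c :: rest =>
    let m0 := pvCellA carton 0 c
    let m1 := pvCellA carton 1 c
    let m2 := pvCellA carton 2 c
    if m0 ≠ 0 ∧ m1 ≠ 0 ∧ m0 > m1 then false
    else if m0 ≠ 0 ∧ m2 ≠ 0 ∧ m0 > m2 then false
    else if m1 ≠ 0 ∧ m2 ≠ 0 ∧ m1 > m2 then false
    else pvLoopA carton rest

def fila_mayor_abajo (mi_carton : List (List Int)) : Bool :=
  pvLoopA mi_carton (PySem.List.pyRange 0 9 1)

-- ===== PORT B =====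
-- vals = [fila[c] for fila in mi_carton[:3] if fila[c] != 0]  (fila[c] through pyGetD; 0 only outside Pre_)
def pvColVals (carton : List (List Int)) (c : Int) : List Int :=
  (PySem.List.slice carton none (some 3)).filterMap
    (fun fila => if PySem.List.pyGetD fila c 0 ≠ 0
                 then some (PySem.List.pyGetD fila c 0) else none)

-- any(a > b for a, b in zip(vals, vals[1:]))
def pvAnyDesc : List Int → Bool
  | a :: b :: t => (decide (a > b)) || pvAnyDesc (b :: t)
  | _ => false

def pvLoopB (carton : List (List Int)) : List Int → Bool
  | [] => true
  | c :: rest =>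
    if pvAnyDesc (pvColVals carton c) then false else pvLoopB carton rest

def fila_mayor_abajo_alt (mi_carton : List (List Int)) : Bool :=
  pvLoopB mi_carton (PySem.List.pyRange 0 9 1)

-- ===== PRECONDITION & SPEC =====
-- cell (i, c): rows 3 and beyond / cells past a row's end read as 0 (exactly the branches Python skips)
def pvM (carton : List (List Int)) (i c : Nat) : Int := (carton.getD i []).getD c 0
-- mi_carton[i][c] is accessible without IndexError
def pvOk (carton : List (List Int)) (i c : Nat) : Prop :=
  i < carton.length ∧ c < (carton.getD i []).length
def pvBad1 (carton : List (List Int)) (c : Nat) : Prop :=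
  pvM carton 0 c ≠ 0 ∧ pvM carton 1 c ≠ 0 ∧ pvM carton 0 c > pvM carton 1 c
def pvBad2 (carton : List (List Int)) (c : Nat) : Prop :=
  pvM carton 0 c ≠ 0 ∧ pvM carton 2 c ≠ 0 ∧ pvM carton 0 c > pvM carton 2 c
def pvBad3 (carton : List (List Int)) (c : Nat) : Prop :=
  pvM carton 1 c ≠ 0 ∧ pvM carton 2 c ≠ 0 ∧ pvM carton 1 c > pvM carton 2 c
-- A's column-c scan reaches the row-2 access
def pvNeed2 (carton : List (List Int)) (c : Nat) : Prop :=
  (pvM carton 0 c ≠ 0 ∧ ¬ pvBad1 carton c) ∨ pvM carton 1 c ≠ 0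
-- A scans column c completely: no raise and no violation
def pvPass (carton : List (List Int)) (c : Nat) : Prop :=
  pvOk carton 0 c ∧ pvOk carton 1 c ∧ ¬ pvBad1 carton c ∧
  (pvNeed2 carton c → pvOk carton 2 c) ∧ ¬ pvBad2 carton c ∧ ¬ pvBad3 carton c
-- A's column-c scan hits an out-of-range access before returning
def pvColRaise (carton : List (List Int)) (c : Nat) : Prop :=
  ¬ pvOk carton 0 c ∨ ¬ pvOk carton 1 c ∨
  (¬ pvBad1 carton c ∧ pvNeed2 carton c ∧ ¬ pvOk carton 2 c)
-- B's column-c compaction reads every present row in range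
def pvOkB (carton : List (List Int)) (c : Nat) : Prop :=
  (0 < carton.length → c < (carton.getD 0 []).length) ∧
  (1 < carton.length → c < (carton.getD 1 []).length) ∧
  (2 < carton.length → c < (carton.getD 2 []).length)
-- B scans column c completely: readable and no descending adjacent pair
def pvPassB (carton : List (List Int)) (c : Nat) : Prop :=
  pvOkB carton c ∧ ¬ pvBad1 carton c ∧ ¬ pvBad2 carton c ∧ ¬ pvBad3 carton c

-- Pre_ excludes the inputs on which A raises IndexError, and additionally the corner inputs
-- on which A returns only because its early exit (a False verdict or an all-zero column)
-- precedes an out-of-range access that B's eager per-column compaction does hit, so B raises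
-- there (see the cited example).
def Pre_fila_mayor_abajo (mi_carton : List (List Int)) : Prop :=
  (∀ k : Nat, k < 9 → (∀ c : Nat, c < k → pvPass mi_carton c) → ¬ pvColRaise mi_carton k) ∧
  (∀ k : Nat, k < 9 → (∀ c : Nat, c < k → pvPassB mi_carton c) → pvOkB mi_carton k)
instance (mi_carton : List (List Int)) : Decidable (Pre_fila_mayor_abajo mi_carton) := by
  unfold Pre_fila_mayor_abajo
  haveI hP : ∀ (ct : List (List Int)) (c : Nat), Decidable (pvPass ct c) := fun ct c => by
    unfold pvPass pvNeed2 pvOk pvBad1 pvBad2 pvBad3; infer_instance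
  haveI hR : ∀ (ct : List (List Int)) (c : Nat), Decidable (pvColRaise ct c) := fun ct c => by
    unfold pvColRaise pvNeed2 pvOk pvBad1; infer_instance
  haveI hPB : ∀ (ct : List (List Int)) (c : Nat), Decidable (pvPassB ct c) := fun ct c => by
    unfold pvPassB pvOkB pvBad1 pvBad2 pvBad3; infer_instance
  haveI hOB : ∀ (ct : List (List Int)) (c : Nat), Decidable (pvOkB ct c) := fun ct c => by
    unfold pvOkB; infer_instance
  infer_instance

def pvWitness_fila_mayor_abajo : List (List Int) :=
  [[1,0,0,0,0,0,0,0,0],[2,0,0,0,0,0,0,0,0],[3,0,0,0,0,0,0,0,0]]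

def Spec_fila_mayor_abajo (mi_carton : List (List Int)) (out : Bool) : Prop := out = fila_mayor_abajo_alt mi_carton
instance (mi_carton : List (List Int)) (out : Bool) : Decidable (Spec_fila_mayor_abajo mi_carton out) := by unfold Spec_fila_mayor_abajo; infer_instance

-- ===== CLAIM (what is proved, stated in full; the proofs are below) =====
def Claim_equal_fila_mayor_abajo : Prop := ∀ (mi_carton : List (List Int)), Dom_fila_mayor_abajo mi_carton → Pre_fila_mayor_abajo mi_carton → Spec_fila_mayor_abajo mi_carton (fila_mayor_abajo mi_carton)

-- ===== LEMMAS AND PROOFS =====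
lemma pvGetD_nil (c : Int) : PySem.List.pyGetD ([] : List Int) c 0 = 0 := by
  refine PySem.List.pyGetD_of_none _ c 0 ?_
  rw [PySem.List.pyGet?_eq_none_iff]
  intro hr
  simp [PySem.Raise.InRange] at hr
  omega

lemma pvColVals_eq (carton : List (List Int)) (c : Int) :
    pvColVals carton c =
      [PySem.List.pyGetD (carton.getD 0 []) c 0,
       PySem.List.pyGetD (carton.getD 1 []) c 0,
       PySem.List.pyGetD (carton.getD 2 []) c 0].filterMap
        (fun v => if v ≠ 0 then some v else none) := by
  have h3 : PySem.List.slice carton none (some ((3:Nat) : Int)) = carton.take 3 :=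
    PySem.List.slice_to_natCast _ _
  norm_num at h3
  match carton with
  | [] => simp [pvColVals, h3, List.filterMap, pvGetD_nil]
  | [r0] => simp [pvColVals, h3, List.filterMap, pvGetD_nil]
  | [r0, r1] => simp [pvColVals, h3, List.filterMap, pvGetD_nil]
  | r0 :: r1 :: r2 :: t => simp [pvColVals, h3, List.filterMap]

lemma pvStep (m0 m1 m2 : Int) (X : Bool) :
    (if m0 ≠ 0 ∧ m1 ≠ 0 ∧ m0 > m1 then false
     else if m0 ≠ 0 ∧ m2 ≠ 0 ∧ m0 > m2 then false
     else if m1 ≠ 0 ∧ m2 ≠ 0 ∧ m1 > m2 then false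
     else X)
    = (if pvAnyDesc ([m0, m1, m2].filterMap (fun v => if v ≠ 0 then some v else none))
       then false else X) := by
  by_cases h0 : m0 = 0 <;> by_cases h1 : m1 = 0 <;> by_cases h2 : m2 = 0 <;>
  by_cases a : m0 > m1 <;> by_cases b : m0 > m2 <;> by_cases d : m1 > m2 <;>
    simp_all [pvAnyDesc] <;>
    first
      | omega
      | simp [decide_eq_false (show ¬ m1 < m0 by omega),
              decide_eq_false (show ¬ m2 < m0 by omega),
              decide_eq_false (show ¬ m2 < m1 by omega)]

-- the two column loops agree step for step (out-of-range cells read as 0 on both sides)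
lemma pvLoops_eq (carton : List (List Int)) (cols : List Int) :
    pvLoopA carton cols = pvLoopB carton cols := by
  induction cols with
  | nil => rfl
  | cons c rest ih =>
    have e0 : pvCellA carton 0 c = PySem.List.pyGetD (carton.getD 0 []) c 0 := by
      unfold pvCellA; rw [PySem.List.pyGetD_ofNat' carton 0 []]
    have e1 : pvCellA carton 1 c = PySem.List.pyGetD (carton.getD 1 []) c 0 := by
      unfold pvCellA; rw [PySem.List.pyGetD_ofNat' carton 1 []]
    have e2 : pvCellA carton 2 c = PySem.List.pyGetD (carton.getD 2 []) c 0 := by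
      unfold pvCellA; rw [PySem.List.pyGetD_ofNat' carton 2 []]
    simp only [pvLoopA, pvLoopB, pvColVals_eq, e0, e1, e2]
    rw [pvStep]
    rw [ih]

-- ===== VERDICT (by name: the statement is the Claim_ definition above) =====
theorem fila_mayor_abajo_spec : Claim_equal_fila_mayor_abajo := by
  intro mi_carton _ _
  unfold Spec_fila_mayor_abajo fila_mayor_abajo fila_mayor_abajo_alt
  exact pvLoops_eq mi_carton _
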